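-- pv_equiv track=rewrite | github.com/xiaobingling93-pixel/Ascend-mind-cluster | component/ascend-faultdiag/src/ascend_fd/pkg/diag/knowledge_graph/kg_diag_job.py | _merge_version_info
-- ===== SOURCE A (Python) =====
-- def _merge_version_info(version_info: dict):
--     """
--     Merge version list into one dict
--     :param version_info:
--         {'worker-0': {'cann_version': '7.0.0',  # different version
--               'driver_version': '23.0.6',  # different version
--               'firm_version': '7.1.0.11.220',
--               'mindspore_version': '2.3.0',
--               'nnae_version': '8.0.RC3',
--               'pytorch_version': '1.11.0',
--               'torch_npu_version': '2.1.0.post8.dev20241009'},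
--          'worker-1': {'cann_version': '7.0.T10',  # different version
--               'driver_version': '23.0.7',  # different version
--               'firm_version': '7.1.0.11.220',
--               'mindspore_version': '2.3.0',
--               'nnae_version': '8.0.RC3',
--               'pytorch_version': '1.11.0',
--               'torch_npu_version': '2.1.0.post8.dev20241009'}}
--     :return:
--         {'driver_version': '23.0.6, 23.0.7',  # merge result
--          'cann_version': '7.0.0, 7.0.T10 (Non-commercial version)',  # merge result
--          'firm_version': '7.1.0.11.220',
--          'nnae_version': '8.0.RC3',
--          'pytorch_version': '1.11.0',
--          'torch_npu_version': '2.1.0.post8.dev20241009',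
--          'mindspore_version': '2.3.0'}
--     """
--     merged_version_info = dict()
--     for _version_info in version_info.values():
--         for version_name, version in _version_info.items():
--             merged_version_info[version_name] = merged_version_info.get(version_name, set())
--             # add non-commercial mark
--             version += " (Non-commercial version)" if "T" in version else ""
--             merged_version_info[version_name].add(version)
--
--     # Only keep first 4 versions
--     for version_name, versions in merged_version_info.items():
--         versions = sorted(list(versions))
--         merged_version_info[version_name] = ', '.join(versions[:4])
--         if len(versions) > 4:
--             merged_version_info[version_name] += '...'
--
--     return merged_version_info
-- ===== SOURCE B (Python) =====
-- def _merge_version_info(version_info: dict):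
--     # pass 1: ordered list of all distinct version-name keys (first-seen order)
--     keys = []
--     seen = set()
--     for worker in version_info.values():
--         for name in worker:
--             if name not in seen:
--                 seen.add(name)
--                 keys.append(name)
--     # pass 2: for each key, rescan every worker and collect the marked values
--     result = {}
--     for name in keys:
--         values = set()
--         for worker in version_info.values():
--             for vname, version in worker.items():
--                 if vname == name:
--                     values.add(version + " (Non-commercial version)" if "T" in version else version)
--         ordered = sorted(values)
--         text = ', '.join(ordered[:4])
--         if len(ordered) > 4:
--             text += '...'
--         result[name] = text
--     return result
-- ===== Notes on version B (the rewrite author's own statement) =====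
-- stated objective: alternative
-- what changed: Replaced A's single accumulate-into-a-defaultdict-of-sets pass by a two-phase decomposition: first index the distinct version-name keys in first-seen order, then for each key rescan all workers collecting its marked values into a set before formatting.
import Mathlib
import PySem

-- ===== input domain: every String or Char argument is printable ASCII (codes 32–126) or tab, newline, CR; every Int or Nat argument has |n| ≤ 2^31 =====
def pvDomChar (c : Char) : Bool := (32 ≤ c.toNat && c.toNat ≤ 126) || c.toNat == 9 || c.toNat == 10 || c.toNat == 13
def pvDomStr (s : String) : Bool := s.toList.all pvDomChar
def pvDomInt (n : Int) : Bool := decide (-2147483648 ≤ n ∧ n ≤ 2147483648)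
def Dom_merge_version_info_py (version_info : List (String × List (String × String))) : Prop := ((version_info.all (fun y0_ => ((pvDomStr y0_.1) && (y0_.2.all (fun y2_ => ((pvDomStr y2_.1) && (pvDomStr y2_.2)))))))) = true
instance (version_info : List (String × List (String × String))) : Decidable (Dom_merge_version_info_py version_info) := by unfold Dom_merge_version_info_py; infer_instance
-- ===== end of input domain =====

-- B replaces A's single accumulate-into-a-dict pass by an index-the-keys-first,
-- then per-key rescan of all workers (objective: alternative decomposition, same cost class).

-- shared helper: version += " (Non-commercial version)" if "T" in version else ""
def pvMark (version : String) : String :=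
  version ++ (if PySem.Str.isIn "T" version then " (Non-commercial version)" else "")

-- shared helper: versions = sorted(list(versions)); ', '.join(versions[:4]) (+ '...' if len > 4)
def pvFmt (versions : PySem.Set String) : String :=
  let vs := PySem.List.sorted versions (fun x => x) false
  let j := PySem.Str.join ", " (vs.take 4)
  if vs.length > 4 then j ++ "..." else j

-- ===== PORT A =====
-- Python's two lines `merged[name] = merged.get(name, set())` then the in-place
-- `.add` store, at name's dict position, the old (or empty) set with the marked version added.
def merge_version_info_py (version_info : List (String × List (String × String))) : List (String × String) :=
  let merged : PySem.Dict String (PySem.Set String) :=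
    version_info.foldl (fun m wi =>
      wi.2.foldl (fun m p =>
        m.insert p.1 (PySem.Set.add (m.getD p.1 PySem.Set.empty) (pvMark p.2))) m)
      PySem.Dict.empty
  -- second loop: each existing key's value replaced in place = map over the items
  merged.items.map (fun q => (q.1, pvFmt q.2))

-- ===== PORT B =====
def merge_version_info_py_alt (version_info : List (String × List (String × String))) : List (String × String) :=
  -- pass 1: ordered set of distinct keys (seen-set + append = PySem.Set.add)
  let keys : PySem.Set String :=
    version_info.foldl (fun ks wi =>
      wi.2.foldl (fun ks p => PySem.Set.add ks p.1) ks) PySem.Set.empty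
  -- pass 2: per key, rescan all workers; result dict has nodup keys so items = this map
  keys.map (fun name =>
    let values : PySem.Set String :=
      version_info.foldl (fun s wi =>
        wi.2.foldl (fun s p =>
          if p.1 == name then PySem.Set.add s (pvMark p.2) else s) s) PySem.Set.empty
    (name, pvFmt values))

-- ===== PRECONDITION & SPEC =====
def Spec_merge_version_info_py (version_info : List (String × List (String × String))) (out : List (String × String)) : Prop := out = merge_version_info_py_alt version_info
instance (version_info : List (String × List (String × String))) (out : List (String × String)) : Decidable (Spec_merge_version_info_py version_info out) := by unfold Spec_merge_version_info_py; infer_instance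

-- ===== CLAIM (what is proved, stated in full; the proofs are below) =====
def Claim_equal_merge_version_info_py : Prop := ∀ (version_info : List (String × List (String × String))), Dom_merge_version_info_py version_info → Spec_merge_version_info_py version_info (merge_version_info_py version_info)

-- ===== LEMMAS AND PROOFS =====

-- a double fold over the workers' item lists is a fold over the flattened item stream
theorem pv_foldl_flat {α σ : Type} (f : σ → String × String → σ)
    (l : List (α × List (String × String))) (a : σ) :
    l.foldl (fun a wi => wi.2.foldl f a) a = (l.flatMap Prod.snd).foldl f a := by
  induction l generalizing a with
  | nil => rfl
  | cons x t ih => simp [List.flatMap_cons, List.foldl_append, ih]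

theorem pv_keys_insert (d : PySem.Dict String (PySem.Set String)) (k : String) (v : PySem.Set String) :
    (d.insert k v).keys = PySem.Set.add d.keys k := by
  by_cases h : d.contains k = true
  · have hm : k ∈ d.keys := (PySem.Dict.contains_iff_mem_keys d k).mp h
    have hc : PySem.Set.contains d.keys k = true := (PySem.Set.contains_iff d.keys k).mpr hm
    rw [PySem.Dict.keys_insert_of_contains _ _ h, PySem.Set.add, hc]
    simp
  · have h' : d.contains k = false := by simpa using h
    have hm : k ∉ d.keys := fun hk => h ((PySem.Dict.contains_iff_mem_keys d k).mpr hk)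
    have hc : PySem.Set.contains d.keys k = false := by
      rw [Bool.eq_false_iff]
      exact fun hcc => hm ((PySem.Set.contains_iff d.keys k).mp hcc)
    rw [PySem.Dict.keys_insert_of_not_contains _ _ h', PySem.Set.add, hc]
    simp

-- core invariant: A's dict-accumulating fold, read out as items, is B's per-key collection
theorem pv_core (its : List (String × String)) (d : PySem.Dict String (PySem.Set String))
    (hnd : d.keys.Nodup) :
    (its.foldl (fun m p =>
        m.insert p.1 (PySem.Set.add (m.getD p.1 PySem.Set.empty) (pvMark p.2))) d).items
    = (PySem.Set.update d.keys (its.map Prod.fst)).map (fun k =>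
        (k, its.foldl (fun s p =>
              if p.1 == k then PySem.Set.add s (pvMark p.2) else s)
            (d.getD k PySem.Set.empty))) := by
  induction its generalizing d with
  | nil =>
    simp [PySem.Set.update, PySem.Dict.items_eq_map_keys d hnd PySem.Set.empty]
  | cons p t ih =>
    simp only [List.foldl_cons, List.map_cons]
    rw [ih _ (by
      rw [pv_keys_insert]
      exact PySem.Set.nodup_add _ _ hnd)]
    rw [pv_keys_insert]
    have hupd : PySem.Set.update d.keys (p.1 :: t.map Prod.fst)
        = PySem.Set.update (PySem.Set.add d.keys p.1) (t.map Prod.fst) := by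
      simp [PySem.Set.update]
    rw [← hupd]
    apply List.map_congr_left
    intro k _
    congr 1
    congr 1
    rw [PySem.Dict.getD_insert]
    by_cases hk : p.1 = k
    · simp [hk]
    · simp [hk, beq_iff_eq, Ne.symm hk]

theorem pv_main (version_info : List (String × List (String × String))) :
    merge_version_info_py version_info = merge_version_info_py_alt version_info := by
  unfold merge_version_info_py merge_version_info_py_alt
  simp only [pv_foldl_flat]
  rw [pv_core _ PySem.Dict.empty (by simp [PySem.Dict.keys_empty])]
  rw [← PySem.Set.update_map_eq_foldl_add]
  simp [PySem.Dict.keys_empty, PySem.Dict.getD_empty, PySem.Set.update_nil_left,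
    List.map_map, Function.comp]

-- ===== VERDICT (by name: the statement is the Claim_ definition above) =====
theorem merge_version_info_py_spec : Claim_equal_merge_version_info_py := by
  intro vi _
  exact pv_main vi
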